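-- pv_equiv track=rewrite | github.com/kodsnack/advent_of_code_2018 | erikdyrelius-python/day20.py | parse
-- ===== SOURCE A (Python) =====
-- def parse(s, m, x, y):
--     i = 0
--     while i < len(s):
--         c = s[i]
--         if c=='N':
--             m[(x, y)]['N'] = (x, y-1)
--             m[(x, y-1)] = dict()
--             y = y - 1
--         elif c=='S':
--             m[(x, y)]['S'] = (x, y+1)
--             m[(x, y+1)] = dict()
--             y = y + 1
--         elif c=='W':
--             m[(x, y)]['W'] = (x-1, y)
--             m[(x-1, y)] = dict()
--             x = x - 1
--         elif c=='E':
--             m[(x, y)]['E'] = (x+1, y)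
--             m[(x+1, y)] = dict()
--             x = x + 1
--         elif c == '^':
--             m[x, y] = dict()
--             while s[i] != '$':
--                 i += parse(s[i+1:], m, x, y)
--         elif c == '(':
--             while s[i] != ')':
--                 i += parse(s[i+1:], m, x, y)
--         elif c == '|':
--             return i+1
--         elif c in ')$':
--             return i+1
--         i += 1
--     return i
-- ===== SOURCE B (Python) =====
-- # Single linear pass with an explicit stack of (saved coordinate, closing delimiter)
-- # frames, replacing A's recursive slice-and-offset machinery; same return value and
-- # the same in-place updates of m on every input admitted by Pre_ (return-value
-- # equivalence is what is proved; the mutation of m is a side effect of both).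
-- def parse(s, m, x, y):
--     stack = []
--     cur = (x, y)
--     i = 0
--     n = len(s)
--     while i < n:
--         c = s[i]
--         if c == 'N' or c == 'S' or c == 'E' or c == 'W':
--             dx, dy = {'N': (0, -1), 'S': (0, 1), 'W': (-1, 0), 'E': (1, 0)}[c]
--             nxt = (cur[0] + dx, cur[1] + dy)
--             m[cur][c] = nxt
--             m[nxt] = dict()
--             cur = nxt
--         elif c == '^':
--             m[cur] = dict()
--             stack.append((cur, '$'))
--         elif c == '(':
--             stack.append((cur, ')'))
--         elif c in '|)$':
--             if not stack:
--                 return i + 1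
--             top, closer = stack[-1]
--             cur = top
--             if c == closer:
--                 stack.pop()
--         i += 1
--     return i
-- ===== Notes on version B (the rewrite author's own statement) =====
-- stated objective: alternative
-- what changed: B replaces A's recursive calls on string slices (with returned offsets accumulated into i) by a single linear scan that keeps an explicit stack of (saved coordinate, closing delimiter) frames, peeking on '|' and popping on the matching closer.
-- outside the precondition, e.g. on parse('N', {(0, 0): {}}, 0, 0): A returns 1, B returns 1
import Mathlib
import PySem

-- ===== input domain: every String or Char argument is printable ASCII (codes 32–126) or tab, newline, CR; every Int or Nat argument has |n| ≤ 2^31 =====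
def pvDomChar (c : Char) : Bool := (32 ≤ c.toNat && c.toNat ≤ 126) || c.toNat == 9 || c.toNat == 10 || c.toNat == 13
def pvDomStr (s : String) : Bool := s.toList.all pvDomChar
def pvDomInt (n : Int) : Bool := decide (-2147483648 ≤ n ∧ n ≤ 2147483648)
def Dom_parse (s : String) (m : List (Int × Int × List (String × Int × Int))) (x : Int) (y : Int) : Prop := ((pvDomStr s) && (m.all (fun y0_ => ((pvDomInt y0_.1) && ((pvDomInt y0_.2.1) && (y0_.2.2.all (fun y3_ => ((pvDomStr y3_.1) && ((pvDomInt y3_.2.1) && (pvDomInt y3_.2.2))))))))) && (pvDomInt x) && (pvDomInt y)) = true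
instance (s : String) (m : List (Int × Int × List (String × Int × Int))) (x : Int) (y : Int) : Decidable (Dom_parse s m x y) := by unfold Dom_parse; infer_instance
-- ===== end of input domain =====

-- B replaces A's recursive slice-and-offset machinery by one linear pass with an explicit
-- stack of saved (coordinate, closing delimiter) frames (objective: alternative).
-- Both A and B mutate the dict argument m in place identically on admitted inputs; the
-- equivalence proved here is about the RETURN value only.

-- ===== PORT A =====
-- The map argument, viewed as a Python dict {(x, y): {dir: (x', y')}}.
abbrev AMap := PySem.Dict (Int × Int) (PySem.Dict String (Int × Int))

def toAMap (m : List (Int × Int × List (String × Int × Int))) : AMap :=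
  PySem.Dict.ofList (m.map (fun e => ((e.1, e.2.1), PySem.Dict.ofList e.2.2)))

-- `m[(x, y)][dir] = v`.  Python raises KeyError when (x, y) ∉ m; that situation is
-- excluded by Pre_parse (modify then leaves m unchanged, and m never affects the result).
def aMove (m : AMap) (xy : Int × Int) (dir : String) (v : Int × Int) : AMap :=
  (m.modify xy PySem.Dict.empty (fun d => d.insert dir v)).insert v PySem.Dict.empty

mutual
-- the outer `while i < len(s)` loop of A; fuel is a port artifact (Python has no fuel),
-- large enough under Pre_parse (proved below); the result pair is (m, i).
def loopA : Nat → List Char → Nat → AMap → Int → Int → AMap × Nat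
  | 0, _, i, m, _, _ => (m, i)
  | fuel+1, s, i, m, x, y =>
    match s[i]? with
    | none => (m, i)
    | some c =>
      if c = 'N' then loopA fuel s (i+1) (aMove m (x, y) "N" (x, y-1)) x (y-1)
      else if c = 'S' then loopA fuel s (i+1) (aMove m (x, y) "S" (x, y+1)) x (y+1)
      else if c = 'W' then loopA fuel s (i+1) (aMove m (x, y) "W" (x-1, y)) (x-1) y
      else if c = 'E' then loopA fuel s (i+1) (aMove m (x, y) "E" (x+1, y)) (x+1) y
      else if c = '^' then
        let p := innerA fuel s i (m.insert (x, y) PySem.Dict.empty) x y '$'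
        loopA fuel s (p.2+1) p.1 x y
      else if c = '(' then
        let p := innerA fuel s i m x y ')'
        loopA fuel s (p.2+1) p.1 x y
      else if c = '|' then (m, i+1)
      else if c = ')' ∨ c = '$' then (m, i+1)
      else loopA fuel s (i+1) m x y

-- the inner `while s[i] != d: i += parse(s[i+1:], m, x, y)` loops of A
-- (d = '$' for the '^' branch, d = ')' for the '(' branch).
def innerA : Nat → List Char → Nat → AMap → Int → Int → Char → AMap × Nat
  | 0, _, i, m, _, _, _ => (m, i)
  | fuel+1, s, i, m, x, y, d =>
    match s[i]? with
    | none => (m, i)  -- Python raises IndexError here; excluded by Pre_parse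
    | some c =>
      if c ≠ d then
        let p := loopA fuel (s.drop (i+1)) 0 m x y   -- the recursive call parse(s[i+1:], m, x, y)
        innerA fuel s (i + p.2) p.1 x y d
      else (m, i)
end

def parse (s : String) (m : List (Int × Int × List (String × Int × Int))) (x : Int) (y : Int) : Int :=
  let cs := s.toList
  ((loopA (2 * cs.length + 2) cs 0 (toAMap m) x y).2 : Nat)

-- ===== PORT B =====
-- B's single loop: one pass over the characters, index i kept for the return value,
-- stack of (saved coordinate, closing delimiter) frames, current coordinate cur.
def goB : List Char → Nat → List ((Int × Int) × Char) → (Int × Int) → AMap → Nat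
  | [], i, _, _, _ => i
  | c :: rest, i, st, cur, m =>
    if c = 'N' ∨ c = 'S' ∨ c = 'E' ∨ c = 'W' then
      let nxt : Int × Int :=
        if c = 'N' then (cur.1, cur.2 - 1)
        else if c = 'S' then (cur.1, cur.2 + 1)
        else if c = 'W' then (cur.1 - 1, cur.2)
        else (cur.1 + 1, cur.2)
      goB rest (i+1) st nxt (aMove m cur (String.ofList [c]) nxt)
    else if c = '^' then
      goB rest (i+1) ((cur, '$') :: st) cur (m.insert cur PySem.Dict.empty)
    else if c = '(' then
      goB rest (i+1) ((cur, ')') :: st) cur m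
    else if c = '|' ∨ c = ')' ∨ c = '$' then
      match st with
      | [] => i + 1
      | (top, closer) :: st' =>
        if c = closer then goB rest (i+1) st' top m else goB rest (i+1) st top m
    else goB rest (i+1) st cur m

def parse_alt (s : String) (m : List (Int × Int × List (String × Int × Int))) (x : Int) (y : Int) : Int :=
  (goB s.toList 0 [] (x, y) (toAMap m) : Nat)

-- ===== PRECONDITION & SPEC =====
def specialChar (c : Char) : Bool := ['N', 'S', 'E', 'W', '^', '(', ')', '|', '$'].contains c
def segChar (c : Char) : Bool := ['N', 'S', 'E', 'W', '(', ')', '|'].contains c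

-- balanced parentheses: scanning from depth d, the depth never goes negative and ends at 0
def balB : List Char → Nat → Bool
  | [], d => d == 0
  | c :: t, d => if c = '(' then balB t (d+1) else if c = ')' then decide (1 ≤ d) && balB t (d-1) else balB t d

-- the first special character of s, if any, is an immediately-returning delimiter
def firstSpecialOk (cs : List Char) : Bool :=
  match cs.find? specialChar with
  | none => true
  | some c => c = '|' || c = ')' || c = '$'

-- s is a proper route string: '^', then moves/alternations/balanced groups, then '$'
def isRoute (cs : List Char) : Bool :=
  match cs with
  | c :: rest => c == '^' && !rest.isEmpty && rest.getLast? == some '$' && rest.dropLast.all segChar && balB rest.dropLast 0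
  | [] => false

-- Pre_parse excludes inputs on which A raises KeyError/IndexError or never terminates
-- (depending on m and the string shape); it admits every string whose first special
-- character already returns, and every well-formed '^route$' string (the function's
-- real domain).  On some excluded inputs A still returns (e.g. a bare move whose source
-- coordinate happens to be in m) and B returns the same value there; they are excluded
-- only because A's returning at all then depends on the contents of m, not on s.
def Pre_parse (s : String) (m : List (Int × Int × List (String × Int × Int))) (x : Int) (y : Int) : Prop :=
  firstSpecialOk s.toList = true ∨ isRoute s.toList = true
instance (s : String) (m : List (Int × Int × List (String × Int × Int))) (x : Int) (y : Int) : Decidable (Pre_parse s m x y) := by unfold Pre_parse; infer_instance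

def pvWitness_parse : String × (List (Int × Int × List (String × Int × Int))) × Int × Int :=
  ("^N(E|W(N|))S$", [], 0, 0)

def Spec_parse (s : String) (m : List (Int × Int × List (String × Int × Int))) (x : Int) (y : Int) (out : Int) : Prop := out = parse_alt s m x y
instance (s : String) (m : List (Int × Int × List (String × Int × Int))) (x : Int) (y : Int) (out : Int) : Decidable (Spec_parse s m x y out) := by unfold Spec_parse; infer_instance

-- ===== CLAIM (what is proved, stated in full; the proofs are below) =====
def Claim_equal_parse : Prop := ∀ (s : String) (m : List (Int × Int × List (String × Int × Int))) (x : Int) (y : Int), Dom_parse s m x y → Pre_parse s m x y → Spec_parse s m x y (parse s m x y)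

-- ===== LEMMAS AND PROOFS =====

-- no '|' at relative depth 0 while scanning from depth d
def topbar : List Char → Nat → Bool
  | [], _ => false
  | c :: t, d =>
    if c = '(' then topbar t (d+1)
    else if c = ')' then topbar t (d-1)
    else if c = '|' then d == 0 || topbar t d
    else topbar t d

theorem bal_append (g : List Char) : ∀ (w : List Char) (d k : Nat), balB g d = true → balB (g ++ w) (d + k) = balB w k := by
  induction g with
  | nil => intro w d k h; simp [balB] at h; subst h; simp
  | cons c t ih =>
    intro w d k h
    rw [List.cons_append]
    simp only [balB] at h ⊢
    split_ifs at h ⊢ with h1 h2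
    · have e : d + k + 1 = (d + 1) + k := by omega
      rw [e]; exact ih w (d+1) k h
    · simp only [Bool.and_eq_true, decide_eq_true_eq] at h
      obtain ⟨hd, hb⟩ := h
      have h1k : 1 ≤ d + k := by omega
      have e : d + k - 1 = (d - 1) + k := by omega
      simp only [h1k, decide_true, Bool.true_and]
      rw [e]; exact ih w (d-1) k hb
    · exact ih w d k h

theorem topbar_append (g : List Char) : ∀ (w : List Char) (d k : Nat), balB g d = true → topbar (g ++ w) (d + (k+1)) = topbar w (k+1) := by
  induction g with
  | nil => intro w d k h; simp [balB] at h; subst h; simp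
  | cons c t ih =>
    intro w d k h
    simp only [balB] at h
    rw [List.cons_append]
    simp only [topbar]
    split_ifs at h ⊢ with h1 h2 h3
    · have e : d + (k + 1) + 1 = (d + 1) + (k + 1) := by omega
      rw [e]; exact ih w (d+1) k h
    · simp only [Bool.and_eq_true, decide_eq_true_eq] at h
      obtain ⟨hd, hb⟩ := h
      have e : d + (k + 1) - 1 = (d - 1) + (k + 1) := by omega
      rw [e]; exact ih w (d-1) k hb
    · have hne : (d + (k + 1) == 0) = false := by simp
      rw [hne]; simp only [Bool.false_or]
      exact ih w d k h
    · exact ih w d k h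

theorem split_close_aux : ∀ (n : Nat) (r : List Char), r.length ≤ n → ∀ d : Nat, balB r (d+1) = true →
    ∃ g t1, r = g ++ ')' :: t1 ∧ balB g 0 = true ∧ balB t1 d = true := by
  intro n
  induction n with
  | zero =>
    intro r hlen d h
    have : r = [] := List.eq_nil_of_length_eq_zero (Nat.le_zero.mp hlen)
    subst this; simp [balB] at h
  | succ n ih =>
    intro r hlen d h
    match r with
    | [] => simp [balB] at h
    | c :: t =>
      by_cases h1 : c = '('
      · subst h1
        simp only [balB, if_pos rfl] at h
        obtain ⟨g1, t1, ht, hg1, ht1⟩ := ih t (by simp at hlen; omega) (d+1) h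
        have ht1len : t1.length ≤ n := by
          have := congrArg List.length ht; simp at this hlen; omega
        obtain ⟨g2, t2, ht1e, hg2, ht2⟩ := ih t1 ht1len d ht1
        refine ⟨'(' :: g1 ++ ')' :: g2, t2, ?_, ?_, ht2⟩
        · rw [ht, ht1e]; simp
        · have hb : balB ((g1 ++ ')' :: g2 : List Char)) (0 + 1) = balB (')' :: g2) 1 :=
            bal_append g1 (')' :: g2) 0 1 hg1
          simp only [balB, hg2, if_pos rfl, zero_add] at hb ⊢
          rw [List.cons_append]
          simp only [balB, if_pos rfl]
          simpa using hb
      · by_cases h2 : c = ')'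
        · subst h2
          simp [balB] at h
          exact ⟨[], t, rfl, by simp [balB], by simpa using h⟩
        · simp only [balB, if_neg h1, if_neg h2] at h
          obtain ⟨g1, t1, ht, hg1, ht1⟩ := ih t (by simp at hlen; omega) d h
          exact ⟨c :: g1, t1, by rw [ht]; rfl, by simp [balB, h1, h2, hg1], ht1⟩

theorem split_close (r : List Char) : ∀ d : Nat, balB r (d+1) = true →
    ∃ g t1, r = g ++ ')' :: t1 ∧ balB g 0 = true ∧ balB t1 d = true :=
  split_close_aux r.length r le_rfl

theorem split_bar_aux : ∀ (n : Nat) (u : List Char), u.length ≤ n → balB u 0 = true → topbar u 0 = true →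
    ∃ a g2, u = a ++ '|' :: g2 ∧ balB a 0 = true ∧ topbar a 0 = false ∧ balB g2 0 = true := by
  intro n
  induction n with
  | zero =>
    intro u hlen hb ht
    have : u = [] := List.eq_nil_of_length_eq_zero (Nat.le_zero.mp hlen)
    subst this; simp [topbar] at ht
  | succ n ih =>
    intro u hlen hb ht
    match u with
    | [] => simp [topbar] at ht
    | c :: t =>
      by_cases h1 : c = '|'
      · subst h1
        refine ⟨[], t, rfl, by simp [balB], by simp [topbar], ?_⟩
        simpa [balB] using hb
      · by_cases h2 : c = '('
        · subst h2
          simp [balB] at hb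
          obtain ⟨g, t1, hteq, hg, ht1⟩ := split_close t 0 (by simpa using hb)
          have htb : topbar t1 0 = true := by
            have h5 := topbar_append g (')' :: t1) 0 0 hg
            simp [topbar] at ht h5
            rw [hteq, h5] at ht; exact ht
          have ht1len : t1.length ≤ n := by
            have := congrArg List.length hteq; simp at this hlen; omega
          obtain ⟨a1, g2, ht1e, ha1, hta1, hg2⟩ := ih t1 ht1len (by simpa using ht1) htb
          refine ⟨'(' :: g ++ ')' :: a1, g2, ?_, ?_, ?_, hg2⟩
          · rw [hteq, ht1e]; simp
          · have h6 := bal_append g (')' :: a1) 0 1 hg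
            simp [balB] at h6
            rw [List.cons_append]
            simp [balB, h6, ha1]
          · have h7 := topbar_append g (')' :: a1) 0 0 hg
            simp [topbar] at h7
            rw [List.cons_append]
            simp [topbar, h7, hta1]
        · by_cases h3 : c = ')'
          · subst h3; simp [balB] at hb
          · have hbt : balB t 0 = true := by simpa [balB, h2, h3] using hb
            have htt : topbar t 0 = true := by simpa [topbar, h1, h2, h3] using ht
            obtain ⟨a1, g2, hte, ha1, hta1, hg2⟩ := ih t (by simp at hlen; omega) hbt htt
            exact ⟨c :: a1, g2, by rw [hte]; rfl, by simp [balB, h2, h3, ha1],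
              by simp [topbar, h1, h2, h3, hta1], hg2⟩

theorem split_bar (u : List Char) : balB u 0 = true → topbar u 0 = true →
    ∃ a g2, u = a ++ '|' :: g2 ∧ balB a 0 = true ∧ topbar a 0 = false ∧ balB g2 0 = true :=
  split_bar_aux u.length u le_rfl

-- property of A's outer loop on a segment (no top-level '|') followed by a delimiter
def PA (u : List Char) : Prop :=
  ∀ (s : List Char) (i : Nat) (w : List Char) (d : Char) (m : AMap) (x y : Int) (fuel : Nat),
    (d = '|' ∨ d = ')' ∨ d = '$') → s.drop i = u ++ d :: w → 2 * u.length + 1 ≤ fuel →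
    (loopA fuel s i m x y).2 = i + u.length + 1

-- property of A's inner loops on an alternation body followed by its closing delimiter
def QA (g : List Char) : Prop :=
  ∀ (s : List Char) (i : Nat) (c0 close : Char) (w : List Char) (m : AMap) (x y : Int) (fuel : Nat),
    (close = ')' ∨ close = '$') → c0 ≠ close → s.drop i = c0 :: (g ++ close :: w) → 2 * g.length + 3 ≤ fuel →
    (innerA fuel s i m x y close).2 = i + 1 + g.length

theorem head_of_drop (s : List Char) (i : Nat) (c : Char) (r : List Char) (h : s.drop i = c :: r) : s[i]? = some c := by
  rw [← List.head?_drop, h]; rfl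

theorem drop_succ_of_drop (s : List Char) (i : Nat) (c : Char) (r : List Char) (h : s.drop i = c :: r) : s.drop (i+1) = r := by
  rw [← List.tail_drop, h]; rfl

theorem drop_shift (s a b : List Char) (i : Nat) (h : s.drop i = a ++ b) : s.drop (i + a.length) = b := by
  rw [← List.drop_drop, h, List.drop_left]

theorem mainA : ∀ n : Nat,
    (∀ u : List Char, u.length ≤ n → u.all segChar = true → balB u 0 = true → topbar u 0 = false → PA u) ∧
    (∀ g : List Char, g.length ≤ n → g.all segChar = true → balB g 0 = true → QA g) := by
  intro n
  induction n using Nat.strong_induction_on with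
  | _ n ih =>
  have hPn : ∀ u : List Char, u.length ≤ n → u.all segChar = true → balB u 0 = true → topbar u 0 = false → PA u := by
    intro u hlen hall hbal htb
    match u with
    | [] =>
      intro s i w d m x y fuel hd hdrop hfuel
      match fuel with
      | 0 => omega
      | f+1 =>
        have hsome : s[i]? = some d := head_of_drop s i d w (by simpa using hdrop)
        rcases hd with rfl | rfl | rfl <;> simp [loopA, hsome]
    | c :: t =>
      have hn1 : 1 ≤ n := le_trans (by simp) hlen
      have hct := List.all_cons .. ▸ hall
      have hsc : segChar c = true := (Bool.and_eq_true .. ▸ hct).1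
      have hallt : t.all segChar = true := (Bool.and_eq_true .. ▸ hct).2
      have hc : c = 'N' ∨ c = 'S' ∨ c = 'E' ∨ c = 'W' ∨ c = '(' ∨ c = ')' ∨ c = '|' := by
        simpa [segChar] using hsc
      rcases hc with rfl | rfl | rfl | rfl | rfl | rfl | rfl
      -- the four moves
      case _ =>
        intro s i w d m x y fuel hd hdrop hfuel
        match fuel with
        | 0 => omega
        | f+1 =>
          have hsome : s[i]? = some 'N' := head_of_drop s i _ _ (by simpa using hdrop)
          have hPt := (ih (n-1) (by omega)).1 t (by simp at hlen; omega) hallt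
            (by simpa [balB] using hbal) (by simpa [topbar] using htb)
          have hrec := hPt s (i+1) w d (aMove m (x, y) "N" (x, y-1)) x (y-1) f hd
            (drop_succ_of_drop s i _ _ (by simpa using hdrop)) (by simp at hfuel ⊢; omega)
          simp only [loopA, hsome]
          rw [if_pos trivial]
          rw [hrec]
          simp only [List.length_cons]; omega
      case _ =>
        intro s i w d m x y fuel hd hdrop hfuel
        match fuel with
        | 0 => omega
        | f+1 =>
          have hsome : s[i]? = some 'S' := head_of_drop s i _ _ (by simpa using hdrop)
          have hPt := (ih (n-1) (by omega)).1 t (by simp at hlen; omega) hallt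
            (by simpa [balB] using hbal) (by simpa [topbar] using htb)
          have hrec := hPt s (i+1) w d (aMove m (x, y) "S" (x, y+1)) x (y+1) f hd
            (drop_succ_of_drop s i _ _ (by simpa using hdrop)) (by simp at hfuel ⊢; omega)
          simp only [loopA, hsome]
          rw [if_neg (by decide), if_pos trivial]
          rw [hrec]
          simp only [List.length_cons]; omega
      case _ =>
        intro s i w d m x y fuel hd hdrop hfuel
        match fuel with
        | 0 => omega
        | f+1 =>
          have hsome : s[i]? = some 'E' := head_of_drop s i _ _ (by simpa using hdrop)
          have hPt := (ih (n-1) (by omega)).1 t (by simp at hlen; omega) hallt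
            (by simpa [balB] using hbal) (by simpa [topbar] using htb)
          have hrec := hPt s (i+1) w d (aMove m (x, y) "E" (x+1, y)) (x+1) y f hd
            (drop_succ_of_drop s i _ _ (by simpa using hdrop)) (by simp at hfuel ⊢; omega)
          simp only [loopA, hsome]
          rw [if_neg (by decide), if_neg (by decide), if_neg (by decide), if_pos trivial]
          rw [hrec]
          simp only [List.length_cons]; omega
      case _ =>
        intro s i w d m x y fuel hd hdrop hfuel
        match fuel with
        | 0 => omega
        | f+1 =>
          have hsome : s[i]? = some 'W' := head_of_drop s i _ _ (by simpa using hdrop)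
          have hPt := (ih (n-1) (by omega)).1 t (by simp at hlen; omega) hallt
            (by simpa [balB] using hbal) (by simpa [topbar] using htb)
          have hrec := hPt s (i+1) w d (aMove m (x, y) "W" (x-1, y)) (x-1) y f hd
            (drop_succ_of_drop s i _ _ (by simpa using hdrop)) (by simp at hfuel ⊢; omega)
          simp only [loopA, hsome]
          rw [if_neg (by decide), if_neg (by decide), if_pos trivial]
          rw [hrec]
          simp only [List.length_cons]; omega
      -- '(' : a balanced group followed by the rest of the segment
      case _ =>
        have hbt : balB t 1 = true := by simpa [balB] using hbal
        obtain ⟨g, t1, hteq, hg, ht1⟩ := split_close t 0 (by simpa using hbt)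
        have hgall : g.all segChar = true ∧ t1.all segChar = true := by
          rw [hteq] at hallt
          simp only [List.all_append, List.all_cons, Bool.and_eq_true] at hallt
          exact ⟨hallt.1, hallt.2.2⟩
        have htb1 : topbar t1 0 = false := by
          have h5 := topbar_append g (')' :: t1) 0 0 hg
          simp [topbar] at htb h5
          rw [hteq, h5] at htb; exact htb
        intro s i w d m x y fuel hd hdrop hfuel
        match fuel with
        | 0 => omega
        | f+1 =>
          have hsome : s[i]? = some '(' := head_of_drop s i _ _ (by simpa using hdrop)
          have hlen' : t.length + 1 ≤ n := by simpa using hlen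
          have hlg : g.length + 1 + t1.length = t.length := by rw [hteq]; simp only [List.length_append, List.length_cons]; omega
          have hflen : 2 * t.length + 3 ≤ f + 1 := by simp at hfuel; omega
          have hQg := (ih (n-1) (by omega)).2 g (by omega) hgall.1 hg
          have hp2 := hQg s i '(' ')' (t1 ++ d :: w) m x y f (Or.inl rfl) (by decide)
            (by rw [hdrop, hteq]; simp) (by omega)
          have hdropt1 : s.drop (i + 1 + g.length + 1) = t1 ++ d :: w := by
            have h9 : s.drop i = ('(' :: g ++ [')']) ++ (t1 ++ d :: w) := by
              rw [hdrop, hteq]; simp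
            have h10 := drop_shift s ('(' :: g ++ [')']) (t1 ++ d :: w) i h9
            have he : i + ('(' :: g ++ [')']).length = i + 1 + g.length + 1 := by simp; omega
            rw [he] at h10; exact h10
          have hPt1 := (ih (n-1) (by omega)).1 t1 (by omega) hgall.2 ht1 htb1
          have hrec := hPt1 s (i + 1 + g.length + 1) w d
            ((innerA f s i m x y ')').1) x y f hd hdropt1 (by omega)

          simp only [loopA, hsome]
          rw [if_neg (by decide), if_neg (by decide), if_neg (by decide), if_neg (by decide),
            if_neg (by decide), if_pos trivial]
          rw [hp2]
          rw [hrec]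
          simp only [List.length_cons]; omega
      -- ')' and '|' are impossible at the head of a segment
      case _ => simp [balB] at hbal
      case _ => simp [topbar] at htb
  refine ⟨hPn, ?_⟩
  intro g hlen hall hbal
  intro s i c0 close w m x y fuel hcl hne hdrop hfuel
  match fuel with
  | 0 => omega
  | f+1 =>
    have hsome : s[i]? = some c0 := head_of_drop s i _ _ hdrop
    have hdropt : s.drop (i+1) = g ++ close :: w := drop_succ_of_drop s i _ _ hdrop
    by_cases htb : topbar g 0 = true
    · -- a first alternative, a '|', and the remaining alternatives
      obtain ⟨a, g2, hgeq, hba, hta, hbg2⟩ := split_bar g hbal htb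
      have hag : a.length + 1 + g2.length = g.length := by rw [hgeq]; simp only [List.length_append, List.length_cons]; omega
      have haall : a.all segChar = true ∧ g2.all segChar = true := by
        rw [hgeq] at hall
        simp only [List.all_append, List.all_cons, Bool.and_eq_true] at hall
        exact ⟨hall.1, hall.2.2⟩
      have hPa := hPn a (by omega) haall.1 hba hta
      have hp2 := hPa (s.drop (i+1)) 0 (g2 ++ close :: w) '|' m x y f (Or.inl rfl)
        (by rw [List.drop_zero, hdropt, hgeq]; simp) (by omega)
      have hQg2 := (ih (n-1) (by omega)).2 g2 (by omega) haall.2 hbg2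
      have hdrop2 : s.drop (i + (a.length + 1)) = '|' :: (g2 ++ close :: w) := by
        have h9 : s.drop i = (c0 :: a) ++ ('|' :: (g2 ++ close :: w)) := by
          rw [hdrop, hgeq]; simp
        have := drop_shift s (c0 :: a) ('|' :: (g2 ++ close :: w)) i h9
        simpa using this
      have hrec := hQg2 s (i + (a.length + 1)) '|' close w
        ((loopA f (s.drop (i+1)) 0 m x y).1) x y f hcl
        (by rcases hcl with rfl | rfl <;> decide) hdrop2 (by omega)
      simp only [innerA, hsome]
      rw [if_pos hne]
      rw [hp2]
      rw [show i + (0 + a.length + 1) = i + (a.length + 1) from by omega]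
      rw [hrec]
      omega
    · -- a single segment closed by `close`
      have hPg := hPn g hlen hall hbal (by simpa using htb)
      have hp2 := hPg (s.drop (i+1)) 0 w close m x y f
        (by rcases hcl with rfl | rfl; exact Or.inr (Or.inl rfl); exact Or.inr (Or.inr rfl))
        (by rw [List.drop_zero, hdropt]) (by omega)
      have hdrop2 : s.drop (i + (g.length + 1)) = close :: w := by
        have h9 : s.drop i = (c0 :: g) ++ (close :: w) := by rw [hdrop]; simp
        have := drop_shift s (c0 :: g) (close :: w) i h9
        simpa using this
      simp only [innerA, hsome]
      rw [if_pos hne]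
      rw [hp2]
      match f, hfuel with
      | f2+1, _ =>
        have hsome2 : s[i + (0 + g.length + 1)]? = some close := by
          rw [show i + (0 + g.length + 1) = i + (g.length + 1) from by omega]
          exact head_of_drop s _ _ _ hdrop2
        simp only [innerA, hsome2]
        rw [if_neg (by simp)]
        omega

theorem goB_run (v : List Char) : ∀ (d : Nat) (ps : List ((Int × Int) × Char)) (i : Nat)
    (cur : Int × Int) (m : AMap) (b : Int × Int),
    v.all segChar = true → balB v d = true → (∀ f ∈ ps, f.2 = ')') → ps.length = d →
    goB (v ++ ['$']) i (ps ++ [(b, '$')]) cur m = i + v.length + 1 := by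
  induction v with
  | nil =>
    intro d ps i cur m b _ hbal hps hlen
    have hd0 : d = 0 := by simpa [balB] using hbal
    subst hd0
    have : ps = [] := List.eq_nil_of_length_eq_zero hlen
    subst this
    simp [goB]
  | cons c v' ihv =>
    intro d ps i cur m b hall hbal hps hlen
    have hsc : segChar c = true := ((Bool.and_eq_true ..).mp ((List.all_cons ..) ▸ hall)).1
    have hall' : v'.all segChar = true := ((Bool.and_eq_true ..).mp ((List.all_cons ..) ▸ hall)).2
    have hc : c = 'N' ∨ c = 'S' ∨ c = 'E' ∨ c = 'W' ∨ c = '(' ∨ c = ')' ∨ c = '|' := by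
      simpa [segChar] using hsc
    rw [List.cons_append]
    rcases hc with rfl | rfl | rfl | rfl | rfl | rfl | rfl
    · simp [goB]
      rw [ihv d ps (i+1) _ _ b hall' (by simpa [balB] using hbal) hps hlen]
      omega
    · simp [goB]
      rw [ihv d ps (i+1) _ _ b hall' (by simpa [balB] using hbal) hps hlen]
      omega
    · simp [goB]
      rw [ihv d ps (i+1) _ _ b hall' (by simpa [balB] using hbal) hps hlen]
      omega
    · simp [goB]
      rw [ihv d ps (i+1) _ _ b hall' (by simpa [balB] using hbal) hps hlen]
      omega
    · -- '(' pushes a ')' frame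
      have hbal' : balB v' (d+1) = true := by simpa [balB] using hbal
      have hih := ihv (d+1) ((cur, ')') :: ps) (i+1) cur m b hall' hbal'
        (fun f hf => by rcases List.mem_cons.mp hf with h | h; exacts [by rw [h], hps f h])
        (by simp [hlen])
      rw [List.cons_append] at hih
      simp [goB]
      rw [hih]
      omega
    · -- ')' pops the matching frame
      have hb : (1 ≤ d) ∧ balB v' (d-1) = true := by simpa [balB] using hbal
      match ps, hlen with
      | [], hlen => exact absurd hb.1 (by simp at hlen; omega)
      | p1 :: ps', hlen =>
        have hp1 : p1.2 = ')' := hps p1 (by simp)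
        have hih := ihv (d-1) ps' (i+1) p1.1 m b hall' hb.2
          (by intro f hf; exact hps f (by simp [hf])) (by simp at hlen; omega)
        obtain ⟨pc, pd⟩ := p1
        simp at hp1; subst hp1
        simp [goB]
        simp at hih
        rw [hih]
        omega
    · -- '|' restores the saved coordinate without popping
      have hbal' : balB v' d = true := by simpa [balB] using hbal
      match ps with
      | [] =>
        have hih := ihv d [] (i+1) b m b hall' hbal' (by intro f hf; cases hf)
          (by simpa using hlen)
        simp [goB]
        simp at hih
        rw [hih]
        omega
      | p1 :: ps' =>
        have hp1 : p1.2 = ')' := hps p1 (by simp)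
        have hih := ihv d (p1 :: ps') (i+1) p1.1 m b hall' hbal' hps hlen
        obtain ⟨pc, pd⟩ := p1
        simp at hp1; subst hp1
        simp [goB]
        rw [List.cons_append] at hih
        rw [hih]
        omega

theorem junk_run (u : List Char) : ∀ (s : List Char) (i : Nat) (mA : AMap) (x y : Int)
    (cur : Int × Int) (mB : AMap) (fuel : Nat),
    firstSpecialOk u = true → s.drop i = u → u.length + 1 ≤ fuel →
    (loopA fuel s i mA x y).2 = goB u i [] cur mB := by
  induction u with
  | nil =>
    intro s i mA x y cur mB fuel _ hdrop hfuel
    match fuel with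
    | f+1 =>
      have hnone : s[i]? = none := by
        rw [← List.head?_drop, hdrop]; rfl
      simp [loopA, goB, hnone]
  | cons c t iht =>
    intro s i mA x y cur mB fuel hok hdrop hfuel
    match fuel with
    | f+1 =>
      have hsome : s[i]? = some c := head_of_drop s i _ _ hdrop
      by_cases hspec : specialChar c = true
      · -- the first special char: it must be one of '|', ')', '$', and both return i+1
        have hc : c = '|' ∨ c = ')' ∨ c = '$' := by
          simp only [firstSpecialOk, List.find?_cons, hspec] at hok
          simp at hok
          tauto
        rcases hc with rfl | rfl | rfl <;>
          simp [loopA, goB, hsome]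
      · -- not special: both sides skip the character
        have hspf : specialChar c = false := by simpa using hspec
        have hok' : firstSpecialOk t = true := by
          simpa only [firstSpecialOk, List.find?_cons, hspf] using hok
        have hcs : ¬(c = 'N') ∧ ¬(c = 'S') ∧ ¬(c = 'E') ∧ ¬(c = 'W') ∧ ¬(c = '^') ∧
            ¬(c = '(') ∧ ¬(c = '|') ∧ ¬(c = ')') ∧ ¬(c = '$') := by
          simp [specialChar] at hspf
          tauto
        obtain ⟨hN, hS, hE, hW, hC, hP, hB, hR, hD⟩ := hcs
        have hdrop' : s.drop (i+1) = t := drop_succ_of_drop s i _ _ hdrop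
        have hrec := iht s (i+1) mA x y cur mB f hok' hdrop' (by simp at hfuel; omega)
        have hA : (loopA (f+1) s i mA x y).2 = (loopA f s (i+1) mA x y).2 := by
          simp only [loopA, hsome]
          rw [if_neg hN, if_neg hS, if_neg hW, if_neg hE, if_neg hC, if_neg hP, if_neg hB,
            if_neg (show ¬(c = ')' ∨ c = '$') from fun h => h.elim hR hD)]
        have hBs : goB (c :: t) i [] cur mB = goB t (i+1) [] cur mB := by
          simp only [goB]
          rw [if_neg (show ¬(c = 'N' ∨ c = 'S' ∨ c = 'E' ∨ c = 'W') from
                fun h => by rcases h with h | h | h | h; exacts [hN h, hS h, hE h, hW h]),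
            if_neg hC, if_neg hP,
            if_neg (show ¬(c = '|' ∨ c = ')' ∨ c = '$') from
                fun h => by rcases h with h | h | h; exacts [hB h, hR h, hD h])]
        rw [hA, hBs]
        exact hrec

-- ===== VERDICT (by name: the statement is the Claim_ definition above) =====
theorem parse_spec : Claim_equal_parse := by
  unfold Claim_equal_parse
  intro s m x y _ hpre
  unfold Spec_parse parse parse_alt
  show ((loopA (2 * s.toList.length + 2) s.toList 0 (toAMap m) x y).2 : Int)
      = ((goB s.toList 0 [] (x, y) (toAMap m) : Nat) : Int)
  rcases hpre with h1 | h2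
  · -- the first special character (if any) returns at once: one common scan
    rw [junk_run s.toList s.toList 0 (toAMap m) x y (x, y) (toAMap m)
      (2 * s.toList.length + 2) h1 (by simp) (by omega)]
  · -- a well-formed '^route$' string: both sides return the string length
    cases hcs : s.toList with
    | nil => rw [hcs] at h2; simp [isRoute] at h2
    | cons c rest =>
      rw [hcs] at h2
      simp only [isRoute, Bool.and_eq_true, beq_iff_eq, Bool.not_eq_true',
        List.isEmpty_eq_false_iff, ne_eq] at h2
      obtain ⟨⟨⟨⟨hc, hne⟩, hlast⟩, hallb⟩, hbalb⟩ := h2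
      subst hc
      have hb : rest = rest.dropLast ++ ['$'] := by
        conv_lhs => rw [← List.dropLast_append_getLast hne]
        have := List.getLast?_eq_getLast (l := rest) hne
        rw [this] at hlast
        rw [Option.some_inj.mp hlast.symm]
      obtain ⟨body, hbe, hallb2, hbalb2⟩ :
          ∃ body, rest = body ++ ['$'] ∧ body.all segChar = true ∧ balB body 0 = true :=
        ⟨rest.dropLast, hb, hallb, hbalb⟩
      subst hbe
      clear hcs
      have hL : (('^' :: (body ++ ['$'])).length) = body.length + 2 := by simp
      -- A side
      have hQ := (mainA body.length).2 body le_rfl hallb2 hbalb2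
      have hp2 := hQ ('^' :: (body ++ ['$'])) 0 '^' '$' []
        ((toAMap m).insert (x, y) PySem.Dict.empty) x y
        (2 * ('^' :: (body ++ ['$'])).length + 1) (Or.inr rfl) (by decide)
        (by simp) (by omega)
      rw [show 2 * (('^' :: (body ++ ['$'])).length) + 2
            = (2 * ('^' :: (body ++ ['$'])).length + 1) + 1 from rfl]
      have hsome : ('^' :: (body ++ ['$']))[0]? = some '^' := rfl
      have hnone : ('^' :: (body ++ ['$']))[0 + 1 + body.length + 1]? = none := by
        apply List.getElem?_eq_none
        simp
      generalize hF : 2 * ('^' :: (body ++ ['$'])).length + 1 = F at hp2 ⊢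
      simp only [loopA, hsome]
      rw [if_neg (by decide), if_neg (by decide), if_neg (by decide), if_neg (by decide),
        if_pos trivial]
      rw [hp2]
      obtain ⟨F2, rfl⟩ : ∃ F2, F = F2 + 1 := ⟨2 * ('^' :: (body ++ ['$'])).length, hF.symm⟩
      simp only [loopA, hnone]
      -- B side
      have hgo := goB_run body 0 [] 1 (x, y)
        ((toAMap m).insert (x, y) PySem.Dict.empty) (x, y) hallb2 hbalb2
        (by intro f hf; cases hf) rfl
      simp only [goB]
      rw [if_neg (by decide), if_pos trivial]
      simp only [List.nil_append] at hgo
      rw [hgo]
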